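-- pv_equiv track=rewrite | github.com/irosadie/bpnn-and-ga-for-import-prediction | core/data.py | dataTimeSeries
-- ===== SOURCE A (Python) =====
-- def dataTimeSeries(data):
--     ts_data = []
--     ts = []
--     for i, k in enumerate(data):
--         for n in k:
--             ts_data.append(n)
--
--     length = len(data[0])
--     for y in range(0, (len(ts_data)-length)):
--         ts.append(ts_data[0+y:(length+1)+y])
--
--     return ts
-- ===== SOURCE B (Python) =====
-- def dataTimeSeries(data):
--     length = len(data[0])
--     ts = []
--     win = []
--     for row in data:
--         for n in row:
--             win.append(n)
--             if len(win) == length + 1: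
--                 ts.append(win)
--                 win = win[1:]
--     return ts
-- ===== Notes on version B (the rewrite author's own statement) =====
-- stated objective: alternative
-- what changed: Replaces A's flatten-then-index-slice construction (a second pass re-slicing the flat list by range indices) with a single streaming pass that maintains a live sliding window, emitting a copy whenever the window fills.
import Mathlib
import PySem

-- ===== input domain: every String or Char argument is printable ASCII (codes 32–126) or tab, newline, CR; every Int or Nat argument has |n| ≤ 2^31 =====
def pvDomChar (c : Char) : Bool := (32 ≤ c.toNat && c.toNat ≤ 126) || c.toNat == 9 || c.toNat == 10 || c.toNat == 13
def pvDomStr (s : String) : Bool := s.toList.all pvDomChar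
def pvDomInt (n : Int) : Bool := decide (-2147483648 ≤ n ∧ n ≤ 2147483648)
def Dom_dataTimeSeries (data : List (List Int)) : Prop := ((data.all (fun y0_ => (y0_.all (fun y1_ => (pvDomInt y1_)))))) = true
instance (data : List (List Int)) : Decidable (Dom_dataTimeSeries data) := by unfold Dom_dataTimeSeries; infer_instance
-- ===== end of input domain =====

-- B replaces A's flatten-then-index-slice second pass by a single streaming pass with a
-- live sliding window (alternative decomposition, same cost; return-value equivalence only).

-- ===== PORT A =====
def dataTimeSeries (data : List (List Int)) : List (List Int) :=
  -- ts_data: the flatten loop 'for i, k in enumerate(data): for n in k: ts_data.append(n)'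
  let ts_data : List Int :=
    (PySem.List.enumerate data).foldl (fun acc ik => ik.2.foldl (fun a n => a ++ [n]) acc) []
  -- 'length = len(data[0])' raises IndexError on empty data: excluded by Pre_
  match PySem.List.pyGet? data 0 with
  | none => []
  | some first =>
    let length : Int := first.length
    (PySem.List.pyRange 0 ((ts_data.length : Int) - length) 1).foldl
      (fun ts y => ts ++ [PySem.List.slice ts_data (some (0 + y)) (some ((length + 1) + y))]) []

-- ===== PORT B =====
-- one step of B's inner loop body: push n; when the window fills, emit it and slide (win[1:])
def pvBStep (L1 : Nat) (st : List (List Int) × List Int) (n : Int) : List (List Int) × List Int :=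
  if (st.2 ++ [n]).length = L1 then
    (st.1 ++ [st.2 ++ [n]], PySem.List.slice (st.2 ++ [n]) (some 1) none)
  else (st.1, st.2 ++ [n])

def dataTimeSeries_alt (data : List (List Int)) : List (List Int) :=
  match PySem.List.pyGet? data 0 with
  | none => []
  | some first =>
    let L1 : Nat := first.length + 1
    (data.foldl (fun st row => row.foldl (pvBStep L1) st) ([], [])).1

-- ===== PRECONDITION & SPEC =====
-- 'len(data[0])' raises IndexError on empty data (in both A and B): excluded.
def Pre_dataTimeSeries (data : List (List Int)) : Prop := data ≠ []
instance (data : List (List Int)) : Decidable (Pre_dataTimeSeries data) := by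
  unfold Pre_dataTimeSeries; infer_instance

def pvWitness_dataTimeSeries : List (List Int) := [[1, 2], [3, 4]]

def Spec_dataTimeSeries (data : List (List Int)) (out : List (List Int)) : Prop := out = dataTimeSeries_alt data
instance (data : List (List Int)) (out : List (List Int)) : Decidable (Spec_dataTimeSeries data out) := by unfold Spec_dataTimeSeries; infer_instance

-- ===== CLAIM (what is proved, stated in full; the proofs are below) =====
def Claim_equal_dataTimeSeries : Prop := ∀ (data : List (List Int)), Dom_dataTimeSeries data → Pre_dataTimeSeries data → Spec_dataTimeSeries data (dataTimeSeries data)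

-- ===== LEMMAS AND PROOFS =====

-- A's flatten loop computes data.flatten (generalized over the enumerate start and accumulator)
theorem pvFoldAppend_eq (data : List (List Int)) : ∀ (s : Int) (acc : List Int),
    (PySem.List.enumerate data s).foldl (fun acc ik => acc ++ ik.2) acc = acc ++ data.flatten := by
  induction data with
  | nil => intro s acc; simp [PySem.List.enumerate_nil]
  | cons k rest ih =>
    intro s acc
    simp only [PySem.List.enumerate_cons, List.foldl_cons, ih, List.flatten_cons, List.append_assoc]

theorem pvFlat_eq (data : List (List Int)) :
    (PySem.List.enumerate data).foldl (fun acc ik => ik.2.foldl (fun a n => a ++ [n]) acc) []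
      = data.flatten := by
  have h : (PySem.List.enumerate data).foldl (fun acc ik => ik.2.foldl (fun a n => a ++ [n]) acc) []
      = (PySem.List.enumerate data).foldl (fun acc ik => acc ++ ik.2) [] := by
    simp only [PySem.List.foldl_append_singleton]
  rw [h]
  simp [pvFoldAppend_eq data 0 []]

-- A's slicing loop, rewritten as a map over List.range
theorem pvA_eq (flat : List Int) (L : Nat) :
    (PySem.List.pyRange 0 ((flat.length : Int) - (L : Int)) 1).foldl
      (fun ts y => ts ++ [PySem.List.slice flat (some (0 + y)) (some (((L : Int) + 1) + y))]) []
      = (List.range (flat.length - L)).map (fun y => (flat.drop y).take (L + 1)) := by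
  rw [PySem.List.foldl_append_singleton_eq_map, PySem.List.pyRange_one, List.map_map]
  have hn : ((flat.length : Int) - (L : Int) - 0).toNat = flat.length - L := by omega
  rw [hn, List.nil_append]
  apply List.map_congr_left
  intro k hk
  simp only [Function.comp]
  rw [PySem.List.slice_toNat flat (by positivity) (by positivity)]
  have h1 : (0 + (0 + (k : Int))).toNat = k := by omega
  have h2 : ((L : Int) + 1 + (0 + (k : Int))).toNat = L + 1 + k := by omega
  rw [h1, h2]
  congr 1
  omega

-- B's loop invariant: starting from a not-yet-full window, the windows emitted are exactly
-- every L1-sized block of win ++ xs whose last element lies in xs.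
theorem pvB_inv (L1 : Nat) (xs : List Int) : ∀ (out : List (List Int)) (win : List Int),
    win.length < L1 →
    (xs.foldl (pvBStep L1) (out, win)).1
      = out ++ (List.range (xs.length + win.length + 1 - L1)).map
          (fun i => ((win ++ xs).drop i).take L1) := by
  induction xs with
  | nil =>
    intro out win h
    have : win.length + 1 - L1 = 0 := by omega
    simp [this]
  | cons n rest ih =>
    intro out win h
    rw [List.foldl_cons]
    by_cases hfull : win.length + 1 = L1
    · have hcond : (win ++ [n]).length = L1 := by simp [hfull]
      have hstep : pvBStep L1 (out, win) n = (out ++ [win ++ [n]], List.drop 1 (win ++ [n])) := by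
        unfold pvBStep
        rw [if_pos (by simpa using hcond), PySem.List.slice_from _ (by norm_num : (0:Int) ≤ 1)]
        norm_num
      rw [hstep]
      rw [ih (out ++ [win ++ [n]]) _ (by simp; omega)]
      have hcnt : rest.length + (List.drop 1 (win ++ [n])).length + 1 - L1 = rest.length := by
        simp; omega
      have hcnt2 : (n :: rest).length + win.length + 1 - L1 = rest.length + 1 := by
        simp; omega
      rw [hcnt, hcnt2, List.range_succ_eq_map, List.map_cons, List.map_map, List.append_assoc]
      congr 1
      rw [List.singleton_append]
      congr 1
      · rw [List.drop_zero]
        have h1 : win ++ n :: rest = (win ++ [n]) ++ rest := by simp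
        rw [h1, List.take_left' hcond]
      · apply List.map_congr_left
        intro i _
        simp only [Function.comp]
        have h1 : win ++ n :: rest = (win ++ [n]) ++ rest := by simp
        have h2 : List.drop 1 ((win ++ [n]) ++ rest) = (List.drop 1 (win ++ [n])) ++ rest :=
          List.drop_append_of_le_length (l₁ := win ++ [n]) (by simp)
        rw [h1, ← h2, List.drop_drop]
        congr 2
        omega
    · have hstep : pvBStep L1 (out, win) n = (out, win ++ [n]) := by
        unfold pvBStep
        rw [if_neg (by simp; omega)]
      rw [hstep, ih out _ (by simp; omega)]
      have : rest.length + (win ++ [n]).length + 1 - L1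
           = (n :: rest).length + win.length + 1 - L1 := by simp; omega
      rw [this]
      simp

-- ===== VERDICT (by name: the statement is the Claim_ definition above) =====
theorem dataTimeSeries_spec : Claim_equal_dataTimeSeries := by
  intro data _ hpre
  unfold Spec_dataTimeSeries dataTimeSeries dataTimeSeries_alt
  cases data with
  | nil => exact absurd rfl hpre
  | cons first rest =>
    have hget : PySem.List.pyGet? (first :: rest) 0 = some first := by
      simp [PySem.List.pyGet?, PySem.List.pyIdx?]
    rw [pvFlat_eq]
    simp only [hget]
    rw [pvA_eq ((first :: rest).flatten) first.length,
        ← List.foldl_flatten, pvB_inv _ _ [] [] (by simp)]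
    simp only [List.nil_append, List.length_nil]
    congr 2
    omega
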